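-- pv_equiv track=rewrite | github.com/AlTheAlligator/BaccBot | Evolution/Simulator/main_sim.py | find_3_consecutive_losses
-- ===== SOURCE A (Python) =====
-- def find_3_consecutive_losses(outcomes, bias, four_start):
--     """
--     Find 3 consecutive losses in the last 6 outcomes.
--     Returns True if 3 consecutive of the SAME outcome as our bias are found.
--
--     Args:
--         outcomes: List of outcomes ('P', 'B', 'T')
--         bias: String indicating the bias ('PPP' or 'BBB')
--         four_start: Whether this started with 4 of the same outcome
--
--     Returns:
--         bool: True if 3 consecutive losses found
--
--     Raises:
--         ValueError: If bias is invalid or outcomes contains invalid values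
--     """
--     if not outcomes:
--         return False
--
--     if bias not in ["PPP", "BBB"]:
--         raise ValueError("bias must be 'PPP' or 'BBB'")
--
--     if any(o not in ['P', 'B', 'T'] for o in outcomes):
--         raise ValueError("outcomes must only contain 'P', 'B', or 'T'")
--
--     if len(outcomes) < 6:
--         return False
--
--     last_6 = get_last_6_without_ties(outcomes, four_start)
--     if len(last_6) < 6:
--         return False
--
--     # Count consecutive occurrences of the bias outcome
--     target = 'P' if bias == 'PPP' else 'B'
--     max_consecutive = 0
--     current_consecutive = 0
--
--     for outcome in last_6:
--         if outcome == target: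
--             current_consecutive += 1
--             max_consecutive = max(max_consecutive, current_consecutive)
--         else:
--             current_consecutive = 0
--
--     return max_consecutive >= 3
--
-- def get_last_6_without_ties(outcomes, four_start):
--     """
--     Get the last 6 Player (P) or Banker (B) outcomes, ignoring ties (T).
--
--     Args:
--         outcomes: List of outcomes ('P', 'B', 'T')
--         four_start: Whether this started with 4 of the same outcome
--
--     Returns:
--         list: Last 6 non-tie outcomes
--
--     Raises:
--         ValueError: If outcomes contains invalid values
--     """
--     if any(o not in ['P', 'B', 'T'] for o in outcomes):
--         raise ValueError("outcomes must only contain 'P', 'B', or 'T'")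
--
--     non_tie_outcomes = [o for o in outcomes if o in ['P', 'B']]
--     return non_tie_outcomes[-6:]  # Only return last 6 non-tie outcomes
-- ===== SOURCE B (Python) =====
-- def find_3_consecutive_losses(outcomes, bias, four_start):
--     if not outcomes:
--         return False
--
--     if bias not in ["PPP", "BBB"]:
--         raise ValueError("bias must be 'PPP' or 'BBB'")
--
--     if any(o not in ('P', 'B', 'T') for o in outcomes):
--         raise ValueError("outcomes must only contain 'P', 'B', or 'T'")
--
--     if len(outcomes) < 6:
--         return False
--
--     last_6 = [o for o in outcomes if o in ('P', 'B')][-6:]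
--     if len(last_6) < 6:
--         return False
--
--     target = 'P' if bias == 'PPP' else 'B'
--     return (target * 3) in ''.join(last_6)
-- ===== Notes on version B (the rewrite author's own statement) =====
-- stated objective: idiomatic
-- what changed: The running max-consecutive counter loop is replaced by joining the last six non-tie outcomes into a string and testing substring membership of target*3, with the tie-filter and [-6:] slice inlined instead of the helper call.
import Mathlib
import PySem

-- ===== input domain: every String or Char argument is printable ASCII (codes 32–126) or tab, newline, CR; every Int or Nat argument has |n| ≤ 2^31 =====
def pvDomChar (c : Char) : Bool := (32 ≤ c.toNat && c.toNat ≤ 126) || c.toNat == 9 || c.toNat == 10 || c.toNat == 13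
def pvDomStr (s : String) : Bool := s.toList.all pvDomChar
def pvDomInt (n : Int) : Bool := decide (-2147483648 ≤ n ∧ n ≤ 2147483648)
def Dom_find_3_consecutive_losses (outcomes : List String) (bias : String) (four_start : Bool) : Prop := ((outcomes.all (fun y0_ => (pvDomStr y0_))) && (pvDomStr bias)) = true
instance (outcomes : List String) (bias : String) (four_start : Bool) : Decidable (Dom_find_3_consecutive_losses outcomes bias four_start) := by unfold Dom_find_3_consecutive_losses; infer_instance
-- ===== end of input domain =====

-- B replaces A's running max-consecutive counter by joining the last six non-tie
-- outcomes into a string and testing substring membership of target*3 (idiomatic).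


-- ===== PORT A =====
-- helper: get_last_6_without_ties (the ValueError branch returns [] here; it is
-- excluded by Pre_ / unreachable from the validated call site)
def get_last_6_without_ties (outcomes : List String) (four_start : Bool) : List String :=
  if outcomes.any (fun o => !(o == "P" || o == "B" || o == "T")) then []  -- raise ValueError
  else PySem.List.slice (outcomes.filter (fun o => o == "P" || o == "B")) (some (-6)) none

def find_3_consecutive_losses (outcomes : List String) (bias : String) (four_start : Bool) : Bool :=
  if outcomes.isEmpty then false
  else if !(bias == "PPP" || bias == "BBB") then false  -- raise ValueError; excluded by Pre_
  else if outcomes.any (fun o => !(o == "P" || o == "B" || o == "T")) then false  -- raise ValueError; excluded by Pre_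
  else if outcomes.length < 6 then false
  else
    let last_6 := get_last_6_without_ties outcomes four_start
    if last_6.length < 6 then false
    else
      let target := if bias == "PPP" then "P" else "B"
      let st := last_6.foldl
        (fun (p : Int × Int) outcome =>
          if outcome == target then (max p.1 (p.2 + 1), p.2 + 1) else (p.1, 0))
        (0, 0)
      st.1 ≥ 3

-- ===== PORT B =====
def find_3_consecutive_losses_alt (outcomes : List String) (bias : String) (four_start : Bool) : Bool :=
  if outcomes.isEmpty then false
  else if !(bias == "PPP" || bias == "BBB") then false  -- raise ValueError; excluded by Pre_
  else if outcomes.any (fun o => !(o == "P" || o == "B" || o == "T")) then false  -- raise ValueError; excluded by Pre_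
  else if outcomes.length < 6 then false
  else
    let last_6 := PySem.List.slice (outcomes.filter (fun o => o == "P" || o == "B")) (some (-6)) none
    if last_6.length < 6 then false
    else
      let target := if bias == "PPP" then "P" else "B"
      -- Python's substring test '(target*3) in s' ported as decidable list-infix on code points (exact on ASCII)
      decide (((target ++ target ++ target).toList) <:+: (String.join last_6).toList)

-- ===== PRECONDITION & SPEC =====
-- Pre_ excludes exactly the inputs on which A raises ValueError: nonempty outcomes with
-- an invalid bias or an outcome outside {'P','B','T'}.
def Pre_find_3_consecutive_losses (outcomes : List String) (bias : String) (four_start : Bool) : Prop :=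
  outcomes = [] ∨ ((bias = "PPP" ∨ bias = "BBB") ∧ ∀ o ∈ outcomes, o = "P" ∨ o = "B" ∨ o = "T")
instance (outcomes : List String) (bias : String) (four_start : Bool) : Decidable (Pre_find_3_consecutive_losses outcomes bias four_start) := by unfold Pre_find_3_consecutive_losses; infer_instance
def pvWitness_find_3_consecutive_losses : List String × String × Bool :=
  (["P", "B", "T", "P", "P", "P", "B"], "PPP", false)
def Spec_find_3_consecutive_losses (outcomes : List String) (bias : String) (four_start : Bool) (out : Bool) : Prop := out = find_3_consecutive_losses_alt outcomes bias four_start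
instance (outcomes : List String) (bias : String) (four_start : Bool) (out : Bool) : Decidable (Spec_find_3_consecutive_losses outcomes bias four_start out) := by unfold Spec_find_3_consecutive_losses; infer_instance

-- ===== CLAIM (what is proved, stated in full; the proofs are below) =====
def Claim_equal_find_3_consecutive_losses : Prop := ∀ (outcomes : List String) (bias : String) (four_start : Bool), Dom_find_3_consecutive_losses outcomes bias four_start → Pre_find_3_consecutive_losses outcomes bias four_start → Spec_find_3_consecutive_losses outcomes bias four_start (find_3_consecutive_losses outcomes bias four_start)

-- ===== LEMMAS AND PROOFS =====

-- the counting loop of A, named so the core lemma can talk about it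
def pvLoopA (l : List String) (target : String) : Int :=
  (l.foldl
    (fun (p : Int × Int) outcome =>
      if outcome == target then (max p.1 (p.2 + 1), p.2 + 1) else (p.1, 0))
    (0, 0)).1

-- core: on a 6-element list of "P"/"B" values, A's counter test equals B's substring test
theorem pvCore (l : List String) (hlen : l.length = 6)
    (hmem : ∀ o ∈ l, o = "P" ∨ o = "B") (target : String)
    (ht : target = "P" ∨ target = "B") :
    (decide (pvLoopA l target ≥ 3)) =
      decide (((target ++ target ++ target).toList) <:+: (String.join l).toList) := by
  match l, hlen with
  | [a, b, c, d, e, f], _ =>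
    have ha := hmem a (by simp)
    have hb := hmem b (by simp)
    have hc := hmem c (by simp)
    have hd := hmem d (by simp)
    have he := hmem e (by simp)
    have hf := hmem f (by simp)
    rcases ht with ht | ht <;> subst ht <;>
      rcases ha with ha | ha <;> subst ha <;>
      rcases hb with hb | hb <;> subst hb <;>
      rcases hc with hc | hc <;> subst hc <;>
      rcases hd with hd | hd <;> subst hd <;>
      rcases he with he | he <;> subst he <;>
      rcases hf with hf | hf <;> subst hf <;>
      decide

-- ===== VERDICT (by name: the statement is the Claim_ definition above) =====
theorem find_3_consecutive_losses_spec : Claim_equal_find_3_consecutive_losses := by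
  intro outcomes bias four_start _hdom hpre
  unfold Spec_find_3_consecutive_losses
  unfold find_3_consecutive_losses find_3_consecutive_losses_alt get_last_6_without_ties
  by_cases hemp : outcomes.isEmpty
  · simp [hemp]
  · simp only [hemp]
    rcases hpre with hpre | ⟨hbias, hval⟩
    · exact absurd (by simp [hpre]) hemp
    have hb : (!(bias == "PPP" || bias == "BBB")) = false := by
      rcases hbias with h | h <;> simp [h]
    have hv : outcomes.any (fun o => !(o == "P" || o == "B" || o == "T")) = false := by
      simp only [List.any_eq_false]
      intro o ho
      rcases hval o ho with h | h | h <;> simp [h]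
    simp only [hb, hv, Bool.false_eq_true, if_false]
    by_cases hlen : outcomes.length < 6
    · simp [hlen]
    · simp only [hlen, if_false]
      set l := PySem.List.slice (outcomes.filter (fun o => o == "P" || o == "B")) (some (-6)) none with hl
      by_cases hl6 : l.length < 6
      · simp [hl6]
      · simp only [hl6, if_false]
        have hle : l.length ≤ 6 := by
          rw [hl, PySem.List.slice_from_neg_ofNat _ 6 (by omega)]
          simp only [List.length_drop]
          omega
        have hlen6 : l.length = 6 := by omega
        have hmem : ∀ o ∈ l, o = "P" ∨ o = "B" := by
          intro o ho
          have : o ∈ outcomes.filter (fun o => o == "P" || o == "B") :=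
            PySem.List.mem_of_mem_slice _ _ _ ho
          have := (List.mem_filter.mp this).2
          rcases (by simpa using this : o = "P" ∨ o = "B") with h | h
          · exact Or.inl h
          · exact Or.inr h
        by_cases hbb : bias == "PPP"
        · simpa [hbb, pvLoopA] using pvCore l hlen6 hmem "P" (Or.inl rfl)
        · simpa [hbb, pvLoopA] using pvCore l hlen6 hmem "B" (Or.inr rfl)
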